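-- pv_equiv track=rewrite | github.com/KrishModi6/hackathon-wolf-hacks | triage_engine.py | _base_tier
-- ===== SOURCE A (Python) =====
-- from typing import Dict, List, Tuple
--
-- SYMPTOMS = {
--     "critical": [
--         "Chest pain",
--         "Difficulty breathing",
--         "Severe bleeding",
--         "Stroke signs (face drooping, slurred speech)",
--         "Unconscious or unresponsive",
--     ],
--     "urgent": [
--         "High fever (over 39C)",
--         "Suspected broken bone",
--         "Deep cut needing stitches",
--         "Severe abdominal pain",
--         "Persistent vomiting",
--     ],
--     "moderate": [
--         "Moderate fever",
--         "Sprain or strain",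
--         "Ear infection",
--         "UTI symptoms",
--         "Persistent cough",
--     ],
--     "mild": [
--         "Cold symptoms",
--         "Mild headache",
--         "Minor cut",
--         "Sore throat",
--         "Rash",
--     ],
--     "signals": [
--         "Numbness or tingling in left arm",
--         "Profuse sweating",
--         "Sudden severe headache",
--         "Confusion or disorientation",
--         "Jaw or shoulder pain",
--         "Swelling around face or throat",
--     ],
-- }
--
-- def _base_tier(symptoms: List[str]) -> str:
--     if any(s in SYMPTOMS["critical"] for s in symptoms):
--         return "critical"
--     if any(s in SYMPTOMS["urgent"] for s in symptoms):
--         return "urgent"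
--     if any(s in SYMPTOMS["moderate"] for s in symptoms):
--         return "moderate"
--     if any(s in SYMPTOMS["mild"] for s in symptoms):
--         return "mild"
--     return "mild"
-- ===== SOURCE B (Python) =====
-- from typing import Dict, List, Tuple
--
-- SYMPTOMS = {
--     "critical": [
--         "Chest pain",
--         "Difficulty breathing",
--         "Severe bleeding",
--         "Stroke signs (face drooping, slurred speech)",
--         "Unconscious or unresponsive",
--     ],
--     "urgent": [
--         "High fever (over 39C)",
--         "Suspected broken bone",
--         "Deep cut needing stitches",
--         "Severe abdominal pain",
--         "Persistent vomiting",
--     ],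
--     "moderate": [
--         "Moderate fever",
--         "Sprain or strain",
--         "Ear infection",
--         "UTI symptoms",
--         "Persistent cough",
--     ],
--     "mild": [
--         "Cold symptoms",
--         "Mild headache",
--         "Minor cut",
--         "Sore throat",
--         "Rash",
--     ],
-- }
--
-- _TIERS = ("critical", "urgent", "moderate", "mild")
-- # symptom -> numeric rank (critical=0 ... mild=3); built once at import time
-- _RANK = {s: i for i, t in enumerate(_TIERS) for s in SYMPTOMS[t]}
-- # rank -> tier name
-- _NAME = {0: "critical", 1: "urgent", 2: "moderate", 3: "mild"}
--
-- def _base_tier(symptoms: List[str]) -> str: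
--     best = 3
--     for s in symptoms:
--         best = min(best, _RANK.get(s, 3))
--     return _NAME.get(best, "mild")
-- ===== Notes on version B (the rewrite author's own statement) =====
-- stated objective: idiomatic
-- what changed: Replaced A's four ordered membership scans over the SYMPTOMS tier lists with a single pass over the input that keeps the minimum rank from a precomputed symptom-to-rank dict (critical=0..mild=3, 'signals' omitted since A never checks it), then maps the best rank back to its tier name.
import Mathlib
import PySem

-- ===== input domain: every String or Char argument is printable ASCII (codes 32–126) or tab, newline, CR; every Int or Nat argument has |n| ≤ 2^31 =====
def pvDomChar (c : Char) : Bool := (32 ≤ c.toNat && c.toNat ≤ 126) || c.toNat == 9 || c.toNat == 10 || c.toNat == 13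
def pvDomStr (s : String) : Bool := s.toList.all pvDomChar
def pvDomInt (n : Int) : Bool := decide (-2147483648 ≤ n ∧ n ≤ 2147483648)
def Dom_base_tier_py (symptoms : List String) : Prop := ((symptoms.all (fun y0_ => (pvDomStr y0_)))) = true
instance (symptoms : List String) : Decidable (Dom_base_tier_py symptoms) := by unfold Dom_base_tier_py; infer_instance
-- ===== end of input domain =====

-- B replaces A's four ordered membership scans with one pass over a precomputed symptom→rank table (objective: idiomatic/alternative).
-- ===== PORT A =====
-- the module-level SYMPTOMS dict
def pvSYMPTOMS : PySem.Dict String (List String) := ⟨[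
  ("critical", ["Chest pain", "Difficulty breathing", "Severe bleeding", "Stroke signs (face drooping, slurred speech)", "Unconscious or unresponsive"]),
  ("urgent", ["High fever (over 39C)", "Suspected broken bone", "Deep cut needing stitches", "Severe abdominal pain", "Persistent vomiting"]),
  ("moderate", ["Moderate fever", "Sprain or strain", "Ear infection", "UTI symptoms", "Persistent cough"]),
  ("mild", ["Cold symptoms", "Mild headache", "Minor cut", "Sore throat", "Rash"]),
  ("signals", ["Numbness or tingling in left arm", "Profuse sweating", "Sudden severe headache", "Confusion or disorientation", "Jaw or shoulder pain", "Swelling around face or throat"])]⟩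

def base_tier_py (symptoms : List String) : String :=
  if symptoms.any (fun s => (PySem.Dict.getD pvSYMPTOMS "critical" []).contains s) then "critical"
  else if symptoms.any (fun s => (PySem.Dict.getD pvSYMPTOMS "urgent" []).contains s) then "urgent"
  else if symptoms.any (fun s => (PySem.Dict.getD pvSYMPTOMS "moderate" []).contains s) then "moderate"
  else if symptoms.any (fun s => (PySem.Dict.getD pvSYMPTOMS "mild" []).contains s) then "mild"
  else "mild"

-- ===== PORT B =====
-- _RANK: symptom -> numeric rank (critical=0 ... mild=3), built once
def pvRANK : PySem.Dict String Int := ⟨[("Chest pain", 0), ("Difficulty breathing", 0), ("Severe bleeding", 0), ("Stroke signs (face drooping, slurred speech)", 0), ("Unconscious or unresponsive", 0), ("High fever (over 39C)", 1), ("Suspected broken bone", 1), ("Deep cut needing stitches", 1), ("Severe abdominal pain", 1), ("Persistent vomiting", 1), ("Moderate fever", 2), ("Sprain or strain", 2), ("Ear infection", 2), ("UTI symptoms", 2), ("Persistent cough", 2), ("Cold symptoms", 3), ("Mild headache", 3), ("Minor cut", 3), ("Sore throat", 3), ("Rash", 3)]⟩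
-- _NAME: rank -> tier name
def pvNAME : PySem.Dict Int String := ⟨[(0, "critical"), (1, "urgent"), (2, "moderate"), (3, "mild")]⟩

def base_tier_py_alt (symptoms : List String) : String :=
  PySem.Dict.getD pvNAME
    (symptoms.foldl (fun best s => min best (PySem.Dict.getD pvRANK s 3)) 3) "mild"

-- ===== PRECONDITION & SPEC =====
def Spec_base_tier_py (symptoms : List String) (out : String) : Prop := out = base_tier_py_alt symptoms
instance (symptoms : List String) (out : String) : Decidable (Spec_base_tier_py symptoms out) := by unfold Spec_base_tier_py; infer_instance

-- ===== CLAIM (what is proved, stated in full; the proofs are below) =====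
def Claim_equal_base_tier_py : Prop := ∀ (symptoms : List String), Dom_base_tier_py symptoms → Spec_base_tier_py symptoms (base_tier_py symptoms)

-- ===== LEMMAS AND PROOFS =====
-- the severity of a single symptom, as A's four list scans see it
def pvTier1 (s : String) : Int :=
  if (PySem.Dict.getD pvSYMPTOMS "critical" []).contains s then 0
  else if (PySem.Dict.getD pvSYMPTOMS "urgent" []).contains s then 1
  else if (PySem.Dict.getD pvSYMPTOMS "moderate" []).contains s then 2
  else 3

-- the severity of a whole list, as A's ordered scans compute it
def pvTier (symptoms : List String) : Int :=
  if symptoms.any (fun s => (PySem.Dict.getD pvSYMPTOMS "critical" []).contains s) then 0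
  else if symptoms.any (fun s => (PySem.Dict.getD pvSYMPTOMS "urgent" []).contains s) then 1
  else if symptoms.any (fun s => (PySem.Dict.getD pvSYMPTOMS "moderate" []).contains s) then 2
  else 3


set_option maxRecDepth 16384 in
-- B's table lookup agrees with A's per-symptom scan order (case split over the 20 table keys)
lemma pvRank_eq_tier1 (s : String) :
    PySem.Dict.getD pvRANK s 3 = pvTier1 s := by
  by_cases h1 : s = "Chest pain"
  · subst h1; decide
  by_cases h2 : s = "Difficulty breathing"
  · subst h2; decide
  by_cases h3 : s = "Severe bleeding"
  · subst h3; decide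
  by_cases h4 : s = "Stroke signs (face drooping, slurred speech)"
  · subst h4; decide
  by_cases h5 : s = "Unconscious or unresponsive"
  · subst h5; decide
  by_cases h6 : s = "High fever (over 39C)"
  · subst h6; decide
  by_cases h7 : s = "Suspected broken bone"
  · subst h7; decide
  by_cases h8 : s = "Deep cut needing stitches"
  · subst h8; decide
  by_cases h9 : s = "Severe abdominal pain"
  · subst h9; decide
  by_cases h10 : s = "Persistent vomiting"
  · subst h10; decide
  by_cases h11 : s = "Moderate fever"
  · subst h11; decide
  by_cases h12 : s = "Sprain or strain"
  · subst h12; decide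
  by_cases h13 : s = "Ear infection"
  · subst h13; decide
  by_cases h14 : s = "UTI symptoms"
  · subst h14; decide
  by_cases h15 : s = "Persistent cough"
  · subst h15; decide
  by_cases h16 : s = "Cold symptoms"
  · subst h16; decide
  by_cases h17 : s = "Mild headache"
  · subst h17; decide
  by_cases h18 : s = "Minor cut"
  · subst h18; decide
  by_cases h19 : s = "Sore throat"
  · subst h19; decide
  by_cases h20 : s = "Rash"
  · subst h20; decide
  have hn : List.find? (fun p => p.1 == s) pvRANK.items = none := by
    rw [List.find?_eq_none]
    intro x hx
    simp only [pvRANK, List.mem_cons, List.not_mem_nil, or_false] at hx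
    rcases hx with rfl|rfl|rfl|rfl|rfl|rfl|rfl|rfl|rfl|rfl|rfl|rfl|rfl|rfl|rfl|rfl|rfl|rfl|rfl|rfl <;>
      simp [beq_iff_eq, @eq_comm String, h1, h2, h3, h4, h5, h6, h7, h8, h9, h10, h11, h12, h13, h14, h15, h16, h17, h18, h19, h20]
  have hgd : PySem.Dict.getD pvRANK s 3 = 3 := by
    simp [PySem.Dict.getD, PySem.Dict.get?, hn]
  have c1 : (PySem.Dict.getD pvSYMPTOMS "critical" []).contains s = false := by
    have e : PySem.Dict.getD pvSYMPTOMS "critical" [] = ["Chest pain", "Difficulty breathing", "Severe bleeding", "Stroke signs (face drooping, slurred speech)", "Unconscious or unresponsive"] := by decide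
    rw [e]
    simp [List.contains_eq_mem, List.mem_cons, List.not_mem_nil, h1, h2, h3, h4, h5]
  have c2 : (PySem.Dict.getD pvSYMPTOMS "urgent" []).contains s = false := by
    have e : PySem.Dict.getD pvSYMPTOMS "urgent" [] = ["High fever (over 39C)", "Suspected broken bone", "Deep cut needing stitches", "Severe abdominal pain", "Persistent vomiting"] := by decide
    rw [e]
    simp [List.contains_eq_mem, List.mem_cons, List.not_mem_nil, h6, h7, h8, h9, h10]
  have c3 : (PySem.Dict.getD pvSYMPTOMS "moderate" []).contains s = false := by
    have e : PySem.Dict.getD pvSYMPTOMS "moderate" [] = ["Moderate fever", "Sprain or strain", "Ear infection", "UTI symptoms", "Persistent cough"] := by decide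
    rw [e]
    simp [List.contains_eq_mem, List.mem_cons, List.not_mem_nil, h11, h12, h13, h14, h15]
  rw [hgd]
  unfold pvTier1
  rw [c1, c2, c3]
  rfl

lemma pvTier1_bounds (s : String) : 0 ≤ pvTier1 s ∧ pvTier1 s ≤ 3 := by
  unfold pvTier1; split_ifs <;> omega

lemma pvTier_bounds (xs : List String) : 0 ≤ pvTier xs ∧ pvTier xs ≤ 3 := by
  unfold pvTier; split_ifs <;> omega

lemma pvTier_cons (s : String) (xs : List String) :
    pvTier (s :: xs) = min (pvTier1 s) (pvTier xs) := by
  simp only [pvTier, pvTier1, List.any_cons, Bool.or_eq_true]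
  split_ifs <;> first | omega | tauto

lemma pvFold_min (xs : List String) (init : Int) (h : init ≤ 3) :
    xs.foldl (fun best s => min best (PySem.Dict.getD pvRANK s 3)) init
      = min init (pvTier xs) := by
  induction xs generalizing init with
  | nil =>
      simp only [List.foldl_nil, pvTier, List.any_nil, if_neg Bool.false_ne_true]
      omega
  | cons s xs ih =>
      have h1 := pvTier_bounds xs
      have h2 := pvTier1_bounds s
      have hb : min init (PySem.Dict.getD pvRANK s 3) ≤ 3 := by
        rw [pvRank_eq_tier1]; omega
      rw [List.foldl_cons, ih _ hb, pvTier_cons, pvRank_eq_tier1]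
      omega

-- ===== VERDICT (by name: the statement is the Claim_ definition above) =====
theorem base_tier_py_spec : Claim_equal_base_tier_py := by
  intro xs _
  unfold Spec_base_tier_py base_tier_py base_tier_py_alt
  rw [pvFold_min xs 3 (by omega)]
  have h := pvTier_bounds xs
  simp only [pvTier] at *
  split_ifs <;> rfl
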